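-- pv_equiv track=rewrite | github.com/hyeon-BL/recording_study | Algorithm(2-2)/Week6/optimalhash.py | optimal_hash
-- ===== SOURCE A (Python) =====
-- def optimal_hash(dna_sequence):
--     """
--     A simple hash function for DNA sequences.
--     This is a basic implementation - real DNA sequence hashing
--     would typically be more sophisticated.
--
--     Args:
--         dna_sequence (str): A DNA sequence containing A, T, G, C
--     Returns:
--         int: Hash value for the sequence
--     """
--     # Convert sequence to uppercase to ensure consistent hashing
--     sequence = dna_sequence.upper()
--
--     # Define base values for each nucleotide
--     nucleotide_values = {'A': 1, 'T': 2, 'G': 3, 'C': 4}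
--
--     # Calculate hash using position-weighted sum
--     hash_value = 0
--     for i, nucleotide in enumerate(sequence):
--         if nucleotide in nucleotide_values:
--             # Use position-weighted value to ensure sequence order matters
--             hash_value += nucleotide_values[nucleotide] * (5 ** i)
--
--     return hash_value
-- ===== SOURCE B (Python) =====
-- def optimal_hash(dna_sequence):
--     # Horner evaluation from the BACK of the sequence: no index, no power
--     # variable -- each step folds the suffix hash into h = h*5 + value.
--     nucleotide_values = {'A': 1, 'T': 2, 'G': 3, 'C': 4}
--     h = 0
--     for nucleotide in reversed(dna_sequence.upper()):
--         h = h * 5 + nucleotide_values.get(nucleotide, 0)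
--     return h
-- ===== Notes on version B (the rewrite author's own statement) =====
-- stated objective: faster
-- what changed: Replaces the position-indexed sum with 5**i recomputed per character by a back-to-front Horner evaluation (h = h*5 + value, no index and no power), turning O(n^2) bit work into O(n) multiplications.
import Mathlib
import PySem

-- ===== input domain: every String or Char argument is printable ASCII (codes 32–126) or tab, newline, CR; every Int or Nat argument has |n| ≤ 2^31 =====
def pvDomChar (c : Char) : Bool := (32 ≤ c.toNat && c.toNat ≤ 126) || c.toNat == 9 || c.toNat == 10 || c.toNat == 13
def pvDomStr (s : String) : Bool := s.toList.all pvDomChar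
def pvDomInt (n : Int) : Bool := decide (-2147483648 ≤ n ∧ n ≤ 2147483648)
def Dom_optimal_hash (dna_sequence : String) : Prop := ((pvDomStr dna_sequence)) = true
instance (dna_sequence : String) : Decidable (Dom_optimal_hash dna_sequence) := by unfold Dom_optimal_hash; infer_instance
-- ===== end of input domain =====

-- B replaces A's indexed sum with 5**i by a back-to-front Horner evaluation (h = h*5 + value): objective faster.

-- the {'A':1,'T':2,'G':3,'C':4} literal both Pythons contain
def nucleotideValues : PySem.Dict Char Int :=
  PySem.Dict.ofList [('A', 1), ('T', 2), ('G', 3), ('C', 4)]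

-- ===== PORT A =====
-- for i, nucleotide in enumerate(sequence): if nucleotide in d: hash += d[nucleotide] * 5**i
def optimal_hash (dna_sequence : String) : Int :=
  let sequence := PySem.Str.upper dna_sequence
  (PySem.List.enumerate sequence.toList 0).foldl
    (fun hash_value p =>
      match nucleotideValues.get? p.2 with
      | some v => hash_value + v * 5 ^ p.1.toNat
      | none => hash_value) 0

-- ===== PORT B =====
-- for nucleotide in reversed(dna_sequence.upper()): h = h*5 + d.get(nucleotide, 0)
def optimal_hash_alt (dna_sequence : String) : Int :=
  (PySem.Str.upper dna_sequence).toList.reverse.foldl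
    (fun h c => h * 5 + (nucleotideValues.get? c).getD 0) 0

-- ===== PRECONDITION & SPEC =====
def Spec_optimal_hash (dna_sequence : String) (out : Int) : Prop := out = optimal_hash_alt dna_sequence
instance (dna_sequence : String) (out : Int) : Decidable (Spec_optimal_hash dna_sequence out) := by unfold Spec_optimal_hash; infer_instance

-- ===== CLAIM =====
def Claim_equal_optimal_hash : Prop := ∀ (dna_sequence : String), Dom_optimal_hash dna_sequence → Spec_optimal_hash dna_sequence (optimal_hash dna_sequence)

-- ===== LEMMAS AND PROOFS =====

-- the Horner value of a suffix, as a foldr (B's reversed foldl in head-first form)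
def hornerVal (l : List Char) : Int :=
  l.foldr (fun c h => h * 5 + (nucleotideValues.get? c).getD 0) 0

-- loop invariant: A's enumerate-fold from index n with accumulator h equals h + 5^n * hornerVal l
theorem hash_fold_eq (l : List Char) : ∀ (n : Nat) (h : Int),
    (PySem.List.enumerate l (n : Int)).foldl
      (fun hash_value p =>
        match nucleotideValues.get? p.2 with
        | some v => hash_value + v * 5 ^ p.1.toNat
        | none => hash_value) h
    = h + 5 ^ n * hornerVal l := by
  induction l with
  | nil => intro n h; simp [PySem.List.enumerate_nil, hornerVal]
  | cons c l ih =>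
    intro n h
    rw [PySem.List.enumerate_cons, List.foldl_cons]
    have hn : ((n : Int) + 1) = ((n + 1 : Nat) : Int) := by push_cast; ring
    rcases hv : nucleotideValues.get? c with _ | v <;>
      rw [hn, ih (n + 1)] <;>
      simp [hornerVal, hv, pow_succ, Int.toNat_natCast] <;> ring

-- ===== VERDICT =====
theorem optimal_hash_spec : Claim_equal_optimal_hash := by
  intro s _
  unfold Spec_optimal_hash optimal_hash optimal_hash_alt
  rw [List.foldl_reverse]
  simpa [hornerVal] using hash_fold_eq (PySem.Str.upper s).toList 0 0
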